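-- pv_equiv track=rewrite | github.com/gmontana/DecodingViewerEmotions | lib/dataset/video.py | scales_pairs
-- ===== SOURCE A (Python) =====
-- def scales_pairs(scales):
--     """
--     Generate pairs of scales for augmentation.
--
--     Parameters:
--     ----------
--     scales: list
--         List of scale values.
--
--     Returns:
--     -------
--     list
--         List of tuples representing scale pairs.
--     """
--
--     pairs = []
--     for i1 in range(len(scales)):
--         for i2 in range(len(scales)):
--             if (abs(i1 - i2) > 1):
--                 continue
--             pairs.append((scales[i1], scales[i2]))
--     return pairs
-- ===== SOURCE B (Python) =====
-- def scales_pairs(scales):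
--     """Same result as A in one index-free pass: walk the list zipped with its successor
--     (None sentinel past the end), carrying the previous element, and emit per element the
--     row (x, prev)?, (x, x), (x, next)?  -- O(n) instead of A's O(n^2) scan of all index pairs."""
--     pairs = []
--     prev = None
--     for x, nxt in zip(scales, scales[1:] + [None]):
--         if prev is not None:
--             pairs.append((x, prev))
--         pairs.append((x, x))
--         if nxt is not None:
--             pairs.append((x, nxt))
--         prev = x
--     return pairs
-- ===== Notes on version B (the rewrite author's own statement) =====
-- stated objective: faster
-- what changed: A scans all n*n index pairs and skips those with |i1-i2|>1; B uses no index scan at all: a single pass over the list zipped with its successors, carrying the previous element, emits per element the (x,prev),(x,x),(x,next) row.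
import Mathlib
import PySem

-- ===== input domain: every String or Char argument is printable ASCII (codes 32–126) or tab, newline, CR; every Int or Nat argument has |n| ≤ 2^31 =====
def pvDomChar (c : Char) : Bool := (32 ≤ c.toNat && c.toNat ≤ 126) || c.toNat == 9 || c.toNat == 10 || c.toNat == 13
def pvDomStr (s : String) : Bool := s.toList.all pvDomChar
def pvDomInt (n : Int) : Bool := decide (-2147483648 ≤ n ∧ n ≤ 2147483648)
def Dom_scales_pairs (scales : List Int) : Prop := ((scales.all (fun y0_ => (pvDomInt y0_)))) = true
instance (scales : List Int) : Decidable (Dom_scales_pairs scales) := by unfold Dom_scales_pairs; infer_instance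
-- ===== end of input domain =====

-- B replaces A's O(n^2) scan-and-skip over all index pairs by one index-free pass: the list
-- zipped with its successors (None past the end), carrying the previous element — O(n).


-- ===== PORT A =====
-- literal transliteration: for i1 in range(len), for i2 in range(len), skip if abs(i1-i2) > 1, else append
def scales_pairs (scales : List Int) : List (Int × Int) :=
  (PySem.List.pyRange 0 (scales.length : Int) 1).foldl (fun pairs i1 =>
    (PySem.List.pyRange 0 (scales.length : Int) 1).foldl (fun pairs i2 =>
      if 1 < |i1 - i2| then pairs
      else pairs ++ [(PySem.List.pyGetD scales i1 0, PySem.List.pyGetD scales i2 0)]) pairs) []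

-- ===== PORT B =====
-- literal transliteration of Source B: the sentinel list 'scales[1:] + [None]' is ported as
-- List (Option Int) ('None' never occurs among the ints); the loop is a foldl whose state
-- is the (pairs, prev) pair, and zip truncates exactly as Python's zip does.
def scales_pairs_alt (scales : List Int) : List (Int × Int) :=
  ((scales.zip ((PySem.List.slice scales (some 1) none).map Option.some ++ [Option.none])).foldl
    (fun (st : List (Int × Int) × Option Int) xn =>
      let pairs1 := match st.2 with
        | none => st.1
        | some p => st.1 ++ [(xn.1, p)]
      let pairs2 := pairs1 ++ [(xn.1, xn.1)]
      let pairs3 := match xn.2 with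
        | none => pairs2
        | some nxt => pairs2 ++ [(xn.1, nxt)]
      (pairs3, some xn.1))
    ([], none)).1

-- ===== PRECONDITION & SPEC =====
def Spec_scales_pairs (scales : List Int) (out : List (Int × Int)) : Prop := out = scales_pairs_alt scales
instance (scales : List Int) (out : List (Int × Int)) : Decidable (Spec_scales_pairs scales out) := by unfold Spec_scales_pairs; infer_instance

-- ===== CLAIM (what is proved, stated in full; the proofs are below) =====
def Claim_equal_scales_pairs : Prop := ∀ (scales : List Int), Dom_scales_pairs scales → Spec_scales_pairs scales (scales_pairs scales)

-- ===== LEMMAS AND PROOFS =====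

-- Common specification: per element x with previous prev and successor (head of t),
-- the row (x,prev)?, (x,x), (x,next)?.
def goSpec (prev : Option Int) : List Int → List (Int × Int)
  | [] => []
  | x :: t =>
    ((match prev with | none => [] | some p => [(x, p)]) ++ [(x, x)] ++
      (match t with | [] => [] | y :: _ => [(x, y)])) ++ goSpec (some x) t

-- The same row, indexed: row prev l k is the row of element k of l (prev only used at k = 0).
def rowSpec (prev : Option Int) (l : List Int) (k : Nat) : List (Int × Int) :=
  (if k = 0 then (match prev with | none => [] | some p => [(l.getD 0 0, p)])
   else [(l.getD k 0, l.getD (k-1) 0)])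
  ++ [(l.getD k 0, l.getD k 0)]
  ++ (if k + 1 < l.length then [(l.getD k 0, l.getD (k+1) 0)] else [])

lemma rowSpec_succ (prev : Option Int) (x : Int) (t : List Int) (k : Nat) :
    rowSpec prev (x :: t) (k + 1) = rowSpec (some x) t k := by
  unfold rowSpec
  cases k with
  | zero => simp [Nat.lt_iff_add_one_le]
  | succ m => simp

lemma goSpec_eq_flatMap : ∀ (t : List Int) (prev : Option Int),
    goSpec prev t = (List.range t.length).flatMap (rowSpec prev t) := by
  intro t
  induction t with
  | nil => intro prev; simp [goSpec]
  | cons x t ih =>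
    intro prev
    rw [goSpec.eq_def, List.length_cons, List.range_succ_eq_map, List.flatMap_cons, List.flatMap_map]
    have h2 : (List.range t.length).flatMap (fun k => rowSpec prev (x :: t) (k + 1))
        = (List.range t.length).flatMap (rowSpec (some x) t) := by
      simp only [List.flatMap_def]
      exact congrArg List.flatten (List.map_congr_left (fun k _ => rowSpec_succ prev x t k))
    rw [h2, ← ih (some x)]
    unfold rowSpec
    cases t with
    | nil => simp
    | cons y t' => simp

-- Filtering the full index range by |i1 - i2| ≤ 1 is exactly the clipped neighbour window.
lemma filter_near_range (n i1 : Int) (h0 : 0 ≤ i1) (h1 : i1 < n) :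
    (PySem.List.pyRange 0 n 1).filter (fun i2 => decide (|i1 - i2| ≤ 1))
      = PySem.List.pyRange (max 0 (i1 - 1)) (min n (i1 + 2)) 1 := by
  have hsplit1 : PySem.List.pyRange 0 n 1
      = PySem.List.pyRange 0 (max 0 (i1 - 1)) 1 ++ PySem.List.pyRange (max 0 (i1 - 1)) n 1 :=
    PySem.List.pyRange_one_append _ _ _ (by omega) (by omega)
  have hsplit2 : PySem.List.pyRange (max 0 (i1 - 1)) n 1
      = PySem.List.pyRange (max 0 (i1 - 1)) (min n (i1 + 2)) 1
        ++ PySem.List.pyRange (min n (i1 + 2)) n 1 :=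
    PySem.List.pyRange_one_append _ _ _ (by omega) (by omega)
  rw [hsplit1, hsplit2, List.filter_append, List.filter_append]
  rw [List.filter_eq_nil_iff.mpr, List.filter_eq_self.mpr, List.filter_eq_nil_iff.mpr]
  · simp
  · intro x hx
    rw [PySem.List.mem_pyRange_one] at hx
    simp only [decide_eq_true_eq, abs_le]
    omega
  · intro x hx
    rw [PySem.List.mem_pyRange_one] at hx
    simp only [decide_eq_true_eq, abs_le]
    omega
  · intro x hx
    rw [PySem.List.mem_pyRange_one] at hx
    simp only [decide_eq_true_eq, abs_le]
    omega

-- The clipped window row of A, at Nat index k < len, is exactly rowSpec none.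
lemma window_row_eq (l : List Int) (k : Nat) (hk : k < l.length) :
    (PySem.List.pyRange (max 0 ((k : Int) - 1)) (min (l.length : Int) ((k : Int) + 2)) 1).map
      (fun i2 => (PySem.List.pyGetD l (k : Int) 0, PySem.List.pyGetD l i2 0))
    = rowSpec none l k := by
  rcases Nat.eq_zero_or_pos k with hk0 | hkpos
  · subst hk0
    rcases Nat.lt_or_ge 1 l.length with h2 | h1
    · -- n ≥ 2 : window [0, 1]
      have hmax : max (0:Int) ((0:Nat) - 1) = 0 := by simp
      have hmin : min ((l.length : Int)) (((0:Nat) : Int) + 2) = 2 := by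
        simp; omega
      rw [hmax, hmin,
        PySem.List.pyRange_one_cons (by omega), (by norm_num : (0:Int) + 1 = 1),
        PySem.List.pyRange_one_cons (by omega), (by norm_num : (1:Int) + 1 = 2),
        PySem.List.pyRange_one_eq_nil (by omega)]
      have e0 : PySem.List.pyGetD l 0 0 = l.getD 0 0 := PySem.List.pyGetD_zero l 0
      have e1 : PySem.List.pyGetD l 1 0 = l.getD 1 0 := by
        rw [show (1:Int) = ((1:Nat):Int) from rfl, PySem.List.pyGetD_natCast]
      simp [rowSpec, h2, e0, e1]
    · -- n = 1 : window [0]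
      have hn : l.length = 1 := by omega
      have hmax : max (0:Int) ((0:Nat) - 1) = 0 := by simp
      have hmin : min ((l.length : Int)) (((0:Nat) : Int) + 2) = 1 := by
        rw [hn]; simp
      rw [hmax, hmin, PySem.List.pyRange_one_cons (by omega),
        (by norm_num : (0:Int) + 1 = 1), PySem.List.pyRange_one_eq_nil (by omega)]
      have e0 : PySem.List.pyGetD l 0 0 = l.getD 0 0 := PySem.List.pyGetD_zero l 0
      simp [rowSpec, hn, e0]
  · have hmax : max (0:Int) ((k : Int) - 1) = ((k - 1 : Nat) : Int) := by
      omega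
    rcases Nat.lt_or_ge (k + 1) l.length with h2 | h1
    · -- interior : window [k-1, k, k+1]
      have hmin : min ((l.length : Int)) ((k : Int) + 2) = (k : Int) + 2 := by omega
      rw [hmax, hmin,
        PySem.List.pyRange_one_cons (by omega),
        (by omega : ((k - 1 : Nat) : Int) + 1 = (k : Int)),
        PySem.List.pyRange_one_cons (by omega),
        PySem.List.pyRange_one_cons (by omega),
        PySem.List.pyRange_one_eq_nil (by omega)]
      have hk1 : ((k : Int)) + 1 = ((k + 1 : Nat) : Int) := by omega
      simp only [List.map_cons, List.map_nil, hk1, PySem.List.pyGetD_natCast]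
      simp [rowSpec, h2, show k ≠ 0 from by omega]
    · -- last element : window [k-1, k]
      have hn : l.length = k + 1 := by omega
      have hmin : min ((l.length : Int)) ((k : Int) + 2) = (k : Int) + 1 := by omega
      rw [hmax, hmin,
        PySem.List.pyRange_one_cons (by omega),
        (by omega : ((k - 1 : Nat) : Int) + 1 = (k : Int)),
        PySem.List.pyRange_one_cons (by omega),
        PySem.List.pyRange_one_eq_nil (by omega)]
      simp only [List.map_cons, List.map_nil, PySem.List.pyGetD_natCast]
      simp [rowSpec, show k ≠ 0 from by omega, hn]

-- B's fold, with any accumulator and prev, produces acc ++ goSpec prev.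
lemma B_fold_eq : ∀ (t : List Int) (prev : Option Int) (acc : List (Int × Int)),
    ((t.zip ((t.tail).map Option.some ++ [Option.none])).foldl
      (fun (st : List (Int × Int) × Option Int) xn =>
        let pairs1 := match st.2 with
          | none => st.1
          | some p => st.1 ++ [(xn.1, p)]
        let pairs2 := pairs1 ++ [(xn.1, xn.1)]
        let pairs3 := match xn.2 with
          | none => pairs2
          | some nxt => pairs2 ++ [(xn.1, nxt)]
        (pairs3, some xn.1))
      (acc, prev)).1 = acc ++ goSpec prev t := by
  intro t
  induction t with
  | nil => intro prev acc; simp [goSpec]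
  | cons x t ih =>
    intro prev acc
    cases t with
    | nil =>
      cases prev <;> simp [goSpec]
    | cons y t' =>
      have hzip : ((x :: y :: t').zip (((x :: y :: t').tail).map Option.some ++ [Option.none]))
          = (x, Option.some y) :: ((y :: t').zip (((y :: t').tail).map Option.some ++ [Option.none])) := by
        simp
      rw [hzip, List.foldl_cons]
      cases prev with
      | none =>
        rw [ih (some x) (acc ++ [(x, x)] ++ [(x, y)])]
        simp [goSpec]
      | some p =>
        rw [ih (some x) (acc ++ [(x, p)] ++ [(x, x)] ++ [(x, y)])]
        simp [goSpec]

-- A equals the common specification.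
lemma A_eq_goSpec (l : List Int) : scales_pairs l = goSpec none l := by
  unfold scales_pairs
  have hstep : ∀ (acc : List (Int × Int)) (i1 : Int), i1 ∈ PySem.List.pyRange 0 (l.length : Int) 1 →
      (PySem.List.pyRange 0 (l.length : Int) 1).foldl (fun pairs i2 =>
        if 1 < |i1 - i2| then pairs
        else pairs ++ [(PySem.List.pyGetD l i1 0, PySem.List.pyGetD l i2 0)]) acc
      = acc ++ (PySem.List.pyRange (max 0 (i1 - 1)) (min (l.length : Int) (i1 + 2)) 1).map
          (fun i2 => (PySem.List.pyGetD l i1 0, PySem.List.pyGetD l i2 0)) := by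
    intro acc i1 hi1
    rw [PySem.List.mem_pyRange_one] at hi1
    have hA : (fun (pairs : List (Int × Int)) i2 =>
          if 1 < |i1 - i2| then pairs
          else pairs ++ [(PySem.List.pyGetD l i1 0, PySem.List.pyGetD l i2 0)])
        = (fun pairs i2 =>
          if decide (|i1 - i2| ≤ 1) = true
          then pairs ++ [(PySem.List.pyGetD l i1 0, PySem.List.pyGetD l i2 0)]
          else pairs) := by
      funext pairs i2
      by_cases h : 1 < |i1 - i2|
      · rw [if_pos h, if_neg (by simpa using not_le.mpr h)]
      · rw [if_neg h, if_pos (by simpa using not_lt.mp h)]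
    rw [hA, PySem.List.foldl_append_if, filter_near_range _ _ hi1.1 hi1.2]
  have hcongr := PySem.List.foldl_congr_mem
      (l := PySem.List.pyRange 0 (l.length : Int) 1)
      (init := ([] : List (Int × Int)))
      (f := fun pairs i1 =>
        (PySem.List.pyRange 0 (l.length : Int) 1).foldl (fun pairs i2 =>
          if 1 < |i1 - i2| then pairs
          else pairs ++ [(PySem.List.pyGetD l i1 0, PySem.List.pyGetD l i2 0)]) pairs)
      (g := fun acc i1 =>
        acc ++ (PySem.List.pyRange (max 0 (i1 - 1)) (min (l.length : Int) (i1 + 2)) 1).map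
          (fun i2 => (PySem.List.pyGetD l i1 0, PySem.List.pyGetD l i2 0)))
      (fun acc x hx => hstep acc x hx)
  rw [hcongr,
    PySem.List.foldl_append_eq_flatMap
      (g := fun i1 =>
        (PySem.List.pyRange (max 0 (i1 - 1)) (min (l.length : Int) (i1 + 2)) 1).map
          (fun i2 => (PySem.List.pyGetD l i1 0, PySem.List.pyGetD l i2 0))),
    List.nil_append,
    PySem.List.pyRange_one (0 : Int) (l.length : Int)]
  simp only [Int.sub_zero, Int.toNat_natCast, List.flatMap_map, Int.zero_add]
  rw [goSpec_eq_flatMap]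
  simp only [List.flatMap_def]
  exact congrArg List.flatten (List.map_congr_left (fun k hk =>
    window_row_eq l k (List.mem_range.mp hk)))

-- ===== VERDICT (by name: the statement is the Claim_ definition above) =====

theorem scales_pairs_spec : Claim_equal_scales_pairs := by
  intro l _
  unfold Spec_scales_pairs scales_pairs_alt
  rw [PySem.List.slice_from_one, B_fold_eq l none [], List.nil_append]
  exact A_eq_goSpec l
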